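-- pv_equiv track=rewrite | github.com/charanjithreddy/LeetCode_leethub | 2931-maximum-spending-after-buying-items/2931-maximum-spending-after-buying-items.py | maxSpending
-- ===== SOURCE A (Python) =====
-- def maxSpending(values):
--     o=[];
--     for i in values:
--         for j in i:
--             o.append(j);
--     o.sort();
--     sum=0;
--     for i in range(len(o)):
--         sum+=(i+1)*o[i];
--     return sum;
--     """
--     :type values: List[List[int]]
--     :rtype: int
--     """
-- ===== SOURCE B (Python) =====
-- def maxSpending(values):
--     # No sorting at all: after a global sort, sum_i (i+1)*o[i] equals the sum
--     # of all elements plus, for every unordered pair, the larger of the two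
--     # (ties contribute their common value once per pair), since element x
--     # is the larger in exactly as many pairs as its extra rank weight.
--     flat = [x for row in values for x in row]
--     total = sum(flat)
--     rest = flat
--     while rest:
--         head, rest = rest[0], rest[1:]
--         for y in rest:
--             total += max(head, y)
--     return total
-- ===== Notes on version B (the rewrite author's own statement) =====
-- stated objective: alternative
-- what changed: B eliminates the sort and rank arithmetic entirely: it uses the identity sum_i (i+1)*o[i] = sum(o) + sum over unordered pairs of max, computed by a pairwise pass over the unsorted flat list.
import Mathlib
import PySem

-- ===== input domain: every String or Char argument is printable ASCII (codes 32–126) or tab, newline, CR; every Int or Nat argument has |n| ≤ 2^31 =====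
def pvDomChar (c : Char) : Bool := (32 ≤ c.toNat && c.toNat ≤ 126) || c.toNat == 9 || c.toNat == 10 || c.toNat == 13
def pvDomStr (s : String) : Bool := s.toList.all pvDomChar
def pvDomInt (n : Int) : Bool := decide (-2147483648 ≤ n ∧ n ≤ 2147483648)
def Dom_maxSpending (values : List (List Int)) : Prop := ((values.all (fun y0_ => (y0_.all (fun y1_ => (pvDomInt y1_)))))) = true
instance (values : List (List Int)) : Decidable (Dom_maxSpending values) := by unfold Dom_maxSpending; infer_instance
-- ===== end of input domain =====

-- B avoids sorting altogether: it computes sum(flat) plus the max of every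
-- unordered pair, which equals A's rank-weighted sum of the sorted flat list
-- (alternative algorithm; O(N^2) vs A's O(N log N)).

-- ===== PORT A =====
def maxSpending (values : List (List Int)) : Int :=
  let o : List Int := values.foldl (fun o i => i.foldl (fun o j => o ++ [j]) o) []
  let o := PySem.List.sorted o (fun x => x) false
  (PySem.List.pyRange 0 (o.length : Int) 1).foldl
    (fun s i => s + (i + 1) * PySem.List.pyGetD o i 0) 0

-- ===== PORT B =====
-- the 'while rest:' loop of Source B: pop the head, add max(head, y) for the rest
def pvPairLoop (total : Int) : List Int → Int
  | [] => total
  | x :: xs => pvPairLoop (xs.foldl (fun s y => s + max x y) total) xs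

def maxSpending_alt (values : List (List Int)) : Int :=
  let flat := values.flatMap (fun row => row)
  pvPairLoop (flat.foldl (· + ·) 0) flat

-- ===== PRECONDITION & SPEC =====
def Spec_maxSpending (values : List (List Int)) (out : Int) : Prop := out = maxSpending_alt values
instance (values : List (List Int)) (out : Int) : Decidable (Spec_maxSpending values out) := by unfold Spec_maxSpending; infer_instance

-- ===== CLAIM (what is proved, stated in full; the proofs are below) =====
def Claim_equal_maxSpending : Prop := ∀ (values : List (List Int)), Dom_maxSpending values → Spec_maxSpending values (maxSpending values)

-- ===== LEMMAS AND PROOFS =====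

-- pair sum: for each x, add max x y for every y after it
def pvPS : List Int → Int
  | [] => 0
  | x :: xs => (xs.map (fun y => max x y)).sum + pvPS xs

theorem pvFoldl_add_map (f : Int → Int) (xs : List Int) (t : Int) :
    xs.foldl (fun s y => s + f y) t = t + (xs.map f).sum := by
  induction xs generalizing t with
  | nil => simp
  | cons x xs ih => simp [List.foldl_cons, ih]; ring

theorem pvPairLoop_eq (xs : List Int) (t : Int) : pvPairLoop t xs = t + pvPS xs := by
  induction xs generalizing t with
  | nil => simp [pvPairLoop, pvPS]
  | cons x xs ih => rw [pvPairLoop, ih, pvFoldl_add_map, pvPS]; ring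

theorem pvPS_perm {l l' : List Int} (h : l.Perm l') : pvPS l = pvPS l' := by
  induction h with
  | nil => rfl
  | cons x h ih =>
    simp only [pvPS, ih, (h.map (fun y => max x y)).sum_eq]
  | swap x y l =>
    simp only [pvPS, List.map_cons, List.sum_cons]
    rw [max_comm y x]
    ring
  | trans _ _ ih1 ih2 => rw [ih1, ih2]

theorem pvPS_append_singleton (l : List Int) (x : Int) :
    pvPS (l ++ [x]) = pvPS l + (l.map (fun y => max y x)).sum := by
  induction l with
  | nil => simp [pvPS]
  | cons a l ih =>
    simp only [List.cons_append, pvPS, ih, List.map_append, List.sum_append,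
      List.map_cons, List.sum_cons, List.map_nil, List.sum_nil]
    rw [max_comm a x]
    ring

-- A's indexed sum over a (≤)-sorted list is the plain sum plus the pair sum.
theorem pvRank_eq_sum_pvPS (o : List Int) (hs : o.Pairwise (· ≤ ·)) :
    (PySem.List.pyRange 0 (o.length : Int) 1).foldl
        (fun s i => s + (i + 1) * PySem.List.pyGetD o i 0) 0
      = o.sum + pvPS o := by
  induction o using List.reverseRecOn with
  | nil => simp [PySem.List.pyRange, pvPS]
  | append_singleton l x ih =>
    have hpw := List.pairwise_append.1 hs
    have hle : ∀ y ∈ l, y ≤ x := fun y hy => hpw.2.2 y hy x (by simp)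
    have hlen : ((l ++ [x]).length : Int) = (l.length : Int) + 1 := by simp
    rw [hlen, PySem.List.pyRange_one_succ_right (by positivity), List.foldl_append]
    have hcongr : (PySem.List.pyRange 0 (l.length : Int) 1).foldl
        (fun s i => s + (i + 1) * PySem.List.pyGetD (l ++ [x]) i 0) 0
        = (PySem.List.pyRange 0 (l.length : Int) 1).foldl
        (fun s i => s + (i + 1) * PySem.List.pyGetD l i 0) 0 := by
      apply PySem.List.foldl_congr_mem
      intro acc i hi
      rcases (PySem.List.mem_pyRange_one).1 hi with ⟨h0, h1⟩
      rw [PySem.List.pyGetD_eq_getElem (xs := l ++ [x]) (i := i) (d := 0) h0 (by simp; omega),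
          PySem.List.pyGetD_eq_getElem (xs := l) (i := i) (d := 0) h0 (by omega)]
      rw [List.getElem_append_left (by omega)]
    have hx : PySem.List.pyGetD (l ++ [x]) ((l.length : Int)) 0 = x := by
      rw [PySem.List.pyGetD_eq_getElem (xs := l ++ [x]) (i := (l.length : Int)) (d := 0) (by positivity) (by simp)]
      simp
    have hmax : (l.map (fun y => max y x)).sum = (l.length : Int) * x := by
      have : l.map (fun y => max y x) = l.map (fun _ => x) := by
        apply List.map_congr_left
        intro y hy
        exact max_eq_right (hle y hy)
      rw [this]
      simp [mul_comm]
    rw [hcongr, ih hpw.1]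
    simp only [List.foldl_cons, List.foldl_nil]
    rw [hx, List.sum_append, pvPS_append_singleton, hmax]
    simp
    ring

-- A's nested append loop builds exactly the flattening B's comprehension builds.
theorem pvFlatten_eq (values : List (List Int)) :
    values.foldl (fun o i => i.foldl (fun o j => o ++ [j]) o) []
      = values.flatMap (fun row => row) := by
  have h : values.foldl (fun o i => i.foldl (fun o j => o ++ [j]) o) []
      = values.foldl (fun o i => o ++ i) [] := by
    apply PySem.List.foldl_congr_mem
    intro acc i _
    exact PySem.List.foldl_append_singleton_eq_self i acc
  rw [h, PySem.List.foldl_append_eq_flatten]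
  simp [List.flatMap_def]

-- ===== VERDICT (by name: the statement is the Claim_ definition above) =====
theorem maxSpending_spec : Claim_equal_maxSpending := by
  intro values _
  unfold Spec_maxSpending maxSpending maxSpending_alt
  simp only [pvFlatten_eq]
  set flat := values.flatMap (fun row => row) with hflat
  have hperm : (PySem.List.sorted flat (fun x => x) false).Perm flat :=
    PySem.List.sorted_perm flat (fun x => x) false
  rw [pvRank_eq_sum_pvPS _ (by simpa using PySem.List.sorted_pairwise (xs := flat) (key := fun x => x)),
      pvPairLoop_eq, hperm.sum_eq, pvPS_perm hperm]
  simp [List.sum_eq_foldl]
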